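-- pv_equiv track=rewrite | github.com/Happy-ryan/codetree-TILs | 240104/아름다운 수/beautiful-number.py | is_beautiful_number
-- ===== SOURCE A (Python) =====
-- def is_beautiful_number(number):
--     s = 0
--     while s < len(number):
--         if number[s] == '1':
--             s += 1
--         elif number[s] == '2':
--             if s + 1 < len(number) and number[s + 1] == '2':
--                 s += 2
--             else:
--                 return False
--         elif number[s] == '3':
--             if s + 2 < len(number) and number[s + 1] == '3' and number[s + 2] == '3':
--                 s += 3
--             else:
--                 return False
--         else:
--             if s + 3 < len(number) and number[s + 1] == '4' and number[s + 2] == '4' and number[s + 3] == '4':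
--                 s += 4
--             else:
--                 return False
--     return True
-- ===== SOURCE B (Python) =====
-- def is_beautiful_number(number):
--     # Single left-to-right pass with a pending-expectation state: after a block's
--     # leading character we record the exact suffix of characters still owed.
--     expect = ""
--     for ch in number:
--         if expect:
--             if ch != expect[0]:
--                 return False
--             expect = expect[1:]
--         elif ch == '1':
--             pass
--         elif ch == '2':
--             expect = "2"
--         elif ch == '3':
--             expect = "33"
--         else:
--             expect = "444"
--     return expect == ""
-- ===== Notes on version B (the rewrite author's own statement) =====
-- stated objective: alternative
-- what changed: Replaced the index-based block parser with multi-character lookahead and bounds checks by a single per-character pass driven by a pending-expectation state string (a small DFA), with no index arithmetic or lookahead.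
import Mathlib
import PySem

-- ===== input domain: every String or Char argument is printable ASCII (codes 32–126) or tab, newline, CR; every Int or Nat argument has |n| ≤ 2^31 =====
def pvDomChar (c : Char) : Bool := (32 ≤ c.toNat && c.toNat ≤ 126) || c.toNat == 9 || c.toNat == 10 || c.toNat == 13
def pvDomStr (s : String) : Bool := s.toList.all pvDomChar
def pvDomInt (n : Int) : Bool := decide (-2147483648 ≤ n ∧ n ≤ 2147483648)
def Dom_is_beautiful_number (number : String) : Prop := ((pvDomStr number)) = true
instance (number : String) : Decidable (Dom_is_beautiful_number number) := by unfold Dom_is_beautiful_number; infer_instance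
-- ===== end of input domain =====

-- B replaces A's index-and-lookahead block parser by a one-pass pending-expectation
-- state machine (alternative decomposition, same cost).


-- ===== PORT A =====
-- while-loop over an index s; each branch checks the lookahead in range before advancing
def aGo (cs : List Char) (s : Nat) : Bool :=
  if s < cs.length then
    if cs.getD s ' ' = '1' then aGo cs (s + 1)
    else if cs.getD s ' ' = '2' then
      if decide (s + 1 < cs.length) && (cs.getD (s + 1) ' ' == '2') then aGo cs (s + 2)
      else false
    else if cs.getD s ' ' = '3' then
      if decide (s + 2 < cs.length) && (cs.getD (s + 1) ' ' == '3') && (cs.getD (s + 2) ' ' == '3') then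
        aGo cs (s + 3)
      else false
    else
      if decide (s + 3 < cs.length) && (cs.getD (s + 1) ' ' == '4') && (cs.getD (s + 2) ' ' == '4')
          && (cs.getD (s + 3) ' ' == '4') then aGo cs (s + 4)
      else false
  else true
termination_by cs.length - s

def is_beautiful_number (number : String) : Bool := aGo number.toList 0

-- ===== PORT B =====
-- one pass over the characters; `expect` is the list of characters still owed by the current block
def altGo (expect : List Char) : List Char → Bool
  | [] => expect == []
  | ch :: rest =>
    match expect with
    | e :: es => if ch ≠ e then false else altGo es rest
    | [] =>
      if ch = '1' then altGo [] rest
      else if ch = '2' then altGo ['2'] rest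
      else if ch = '3' then altGo ['3', '3'] rest
      else altGo ['4', '4', '4'] rest

def is_beautiful_number_alt (number : String) : Bool := altGo [] number.toList

-- ===== PRECONDITION & SPEC =====
def Spec_is_beautiful_number (number : String) (out : Bool) : Prop := out = is_beautiful_number_alt number
instance (number : String) (out : Bool) : Decidable (Spec_is_beautiful_number number out) := by unfold Spec_is_beautiful_number; infer_instance

-- ===== CLAIM (what is proved, stated in full; the proofs are below) =====
def Claim_equal_is_beautiful_number : Prop := ∀ (number : String), Dom_is_beautiful_number number → Spec_is_beautiful_number number (is_beautiful_number number)

-- ===== LEMMAS AND PROOFS =====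

-- the loop of A, read from position s, computes B's machine run on the suffix
theorem aGo_eq_altGo (cs : List Char) (s : Nat) : aGo cs s = altGo [] (cs.drop s) := by
  fun_induction aGo cs s with
  | case1 s h hc ih =>
    -- number[s] == '1'
    rw [List.getD_eq_getElem cs ' ' h] at hc
    rw [List.drop_eq_getElem_cons h, ih]
    simp [altGo, hc]
  | case2 s h hn1 hc hcond ih =>
    -- '2' block, lookahead succeeds
    rw [List.getD_eq_getElem cs ' ' h] at hn1 hc
    simp only [Bool.and_eq_true, decide_eq_true_eq, beq_iff_eq] at hcond
    obtain ⟨h1, e1⟩ := hcond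
    rw [List.getD_eq_getElem cs ' ' h1] at e1
    rw [List.drop_eq_getElem_cons h, List.drop_eq_getElem_cons h1, ih]
    simp [altGo, hc, e1]
  | case3 s h hn1 hc hcond =>
    -- '2' block, lookahead fails: both sides reject
    rw [List.getD_eq_getElem cs ' ' h] at hn1 hc
    simp only [Bool.and_eq_true, decide_eq_true_eq, beq_iff_eq, not_and] at hcond
    rw [List.drop_eq_getElem_cons h]
    by_cases h1 : s + 1 < cs.length
    · rw [List.getD_eq_getElem cs ' ' h1] at hcond
      rw [List.drop_eq_getElem_cons h1]
      simp [altGo, hc, hcond h1]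
    · rw [List.drop_eq_nil_of_le (by omega)]
      simp [altGo, hc]
  | case4 s h hn1 hn2 hc hcond ih =>
    -- '3' block, lookahead succeeds
    rw [List.getD_eq_getElem cs ' ' h] at hn1 hn2 hc
    simp only [Bool.and_eq_true, decide_eq_true_eq, beq_iff_eq] at hcond
    obtain ⟨⟨h2, e1⟩, e2⟩ := hcond
    rw [List.getD_eq_getElem cs ' ' (by omega)] at e1
    rw [List.getD_eq_getElem cs ' ' h2] at e2
    rw [List.drop_eq_getElem_cons h, List.drop_eq_getElem_cons (show s + 1 < cs.length by omega),
      List.drop_eq_getElem_cons h2, ih]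
    simp [altGo, hc, e1, e2]
  | case5 s h hn1 hn2 hc hcond =>
    -- '3' block, lookahead fails: both sides reject
    rw [List.getD_eq_getElem cs ' ' h] at hn1 hn2 hc
    simp only [Bool.and_eq_true, decide_eq_true_eq, beq_iff_eq, not_and] at hcond
    rw [List.drop_eq_getElem_cons h]
    by_cases h1 : s + 1 < cs.length
    · rw [List.getD_eq_getElem cs ' ' h1] at hcond
      rw [List.drop_eq_getElem_cons h1]
      by_cases e1 : cs[s + 1] = '3'
      · by_cases h2 : s + 2 < cs.length
        · rw [List.getD_eq_getElem cs ' ' h2] at hcond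
          rw [List.drop_eq_getElem_cons h2]
          have e2 : ¬ cs[s + 2] = '3' := fun he => hcond ⟨h2, e1⟩ he
          simp [altGo, hc, e1, e2]
        · rw [List.drop_eq_nil_of_le (by omega)]
          simp [altGo, hc, e1]
      · simp [altGo, hc, e1]
    · rw [List.drop_eq_nil_of_le (by omega)]
      simp [altGo, hc]
  | case6 s h hn1 hn2 hn3 hcond ih =>
    -- 4-block (any other leading char), lookahead succeeds
    rw [List.getD_eq_getElem cs ' ' h] at hn1 hn2 hn3
    simp only [Bool.and_eq_true, decide_eq_true_eq, beq_iff_eq] at hcond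
    obtain ⟨⟨⟨h3, e1⟩, e2⟩, e3⟩ := hcond
    rw [List.getD_eq_getElem cs ' ' (by omega)] at e1
    rw [List.getD_eq_getElem cs ' ' (by omega)] at e2
    rw [List.getD_eq_getElem cs ' ' h3] at e3
    rw [List.drop_eq_getElem_cons h, List.drop_eq_getElem_cons (show s + 1 < cs.length by omega),
      List.drop_eq_getElem_cons (show s + 2 < cs.length by omega),
      List.drop_eq_getElem_cons h3, ih]
    simp [altGo, hn1, hn2, hn3, e1, e2, e3]
  | case7 s h hn1 hn2 hn3 hcond =>
    -- 4-block, lookahead fails: both sides reject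
    rw [List.getD_eq_getElem cs ' ' h] at hn1 hn2 hn3
    simp only [Bool.and_eq_true, decide_eq_true_eq, beq_iff_eq, not_and] at hcond
    rw [List.drop_eq_getElem_cons h]
    by_cases h1 : s + 1 < cs.length
    · rw [List.getD_eq_getElem cs ' ' h1] at hcond
      rw [List.drop_eq_getElem_cons h1]
      by_cases e1 : cs[s + 1] = '4'
      · by_cases h2 : s + 2 < cs.length
        · rw [List.getD_eq_getElem cs ' ' h2] at hcond
          rw [List.drop_eq_getElem_cons h2]
          by_cases e2 : cs[s + 2] = '4'
          · by_cases h3 : s + 3 < cs.length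
            · rw [List.getD_eq_getElem cs ' ' h3] at hcond
              rw [List.drop_eq_getElem_cons h3]
              have e3 : ¬ cs[s + 3] = '4' := fun he => hcond ⟨⟨h3, e1⟩, e2⟩ he
              simp [altGo, hn1, hn2, hn3, e1, e2, e3]
            · rw [List.drop_eq_nil_of_le (by omega)]
              simp [altGo, hn1, hn2, hn3, e1, e2]
          · simp [altGo, hn1, hn2, hn3, e1, e2]
        · rw [List.drop_eq_nil_of_le (by omega)]
          simp [altGo, hn1, hn2, hn3, e1]
      · simp [altGo, hn1, hn2, hn3, e1]
    · rw [List.drop_eq_nil_of_le (by omega)]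
      simp [altGo, hn1, hn2, hn3]
  | case8 s h =>
    rw [List.drop_eq_nil_of_le (by omega)]
    simp [altGo]

-- ===== VERDICT (by name: the statement is the Claim_ definition above) =====
theorem is_beautiful_number_spec : Claim_equal_is_beautiful_number := by
  intro number _
  unfold Spec_is_beautiful_number is_beautiful_number is_beautiful_number_alt
  simpa using aGo_eq_altGo number.toList 0
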